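-- pv_equiv track=rewrite | github.com/tianmaxingkonggrant/interview | currency_converter.py | _successive_repeated
-- ===== SOURCE A (Python) =====
-- REPEATED_SYMBOLS = ["I", "X", "C", "M"]
--
-- NO_REPEATED_SYMBOLS = ["D", "L", "V"]
--
-- def _successive_repeated(roman_symbols):
--     """
--     deal with successive repeated symbols, ensure right successive repeated
--     :param roman_symbols: list, like ["X", "X"]
--     :return: tuple of successive_flag(bool) and symbol_index(int)
--     """
--     successive_flag = False
--     symbol_index = -1
--     for index, symbol in enumerate(roman_symbols):
--         if symbol in NO_REPEATED_SYMBOLS: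
--             try:
--                 next_symbol = roman_symbols[index + 1]
--             except Exception as e:
--                 next_symbol = ""
--             if symbol != next_symbol:
--                 successive_flag = False
--             else:
--                 successive_flag = True
--                 symbol_index = index
--         if symbol in REPEATED_SYMBOLS:
--             try:
--                 # just test next third value from current value of roman_symbols
--                 roman_symbols[index + 3]
--             except Exception as e:
--                 next_successive_symbols = []
--             else:
--                 next_successive_symbols = roman_symbols[index:index + 4]
--             if len(set(next_successive_symbols)) == 1:
--                 successive_flag = True
--                 symbol_index = index
--             else:
--                 successive_flag = False
--         if successive_flag:
--             break
--     return successive_flag, symbol_index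
-- ===== SOURCE B (Python) =====
-- REPEATED_SYMBOLS = ["I", "X", "C", "M"]
--
-- NO_REPEATED_SYMBOLS = ["D", "L", "V"]
--
-- def _successive_repeated(roman_symbols):
--     # Run-length encode, then scan the groups for the first offending run.
--     groups = []
--     i = 0
--     n = len(roman_symbols)
--     while i < n:
--         j = i + 1
--         while j < n and roman_symbols[j] == roman_symbols[i]:
--             j += 1
--         groups.append((roman_symbols[i], i, j - i))
--         i = j
--     for symbol, start, length in groups:
--         if symbol in NO_REPEATED_SYMBOLS and length >= 2:
--             return True, start
--         if symbol in REPEATED_SYMBOLS and length >= 4: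
--             return True, start
--     return False, -1
-- ===== Notes on version B (the rewrite author's own statement) =====
-- stated objective: alternative
-- what changed: Replaces A's per-index scan with window slicing and per-window set() checks by a run-length encoding pass followed by a scan over the groups (first group of a no-repeat symbol with length >= 2, or of a repeatable symbol with length >= 4).
import Mathlib
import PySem

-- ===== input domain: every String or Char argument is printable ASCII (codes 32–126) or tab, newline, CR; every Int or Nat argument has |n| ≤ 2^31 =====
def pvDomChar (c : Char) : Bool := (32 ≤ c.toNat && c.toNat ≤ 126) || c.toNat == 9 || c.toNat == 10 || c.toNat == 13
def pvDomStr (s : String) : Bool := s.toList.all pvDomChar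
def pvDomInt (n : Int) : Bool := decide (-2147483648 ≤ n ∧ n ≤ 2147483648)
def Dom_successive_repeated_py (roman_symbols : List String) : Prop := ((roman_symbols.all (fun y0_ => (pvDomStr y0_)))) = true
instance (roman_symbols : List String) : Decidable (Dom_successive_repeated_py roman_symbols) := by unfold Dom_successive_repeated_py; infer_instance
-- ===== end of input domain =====

-- B replaces A's per-index window test by a run-length encoding followed by a scan of the groups (alternative decomposition, same cost).

-- ===== PORT A =====
def REPEATED_SYMBOLS : List String := ["I", "X", "C", "M"]

def NO_REPEATED_SYMBOLS : List String := ["D", "L", "V"]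

-- the 'for index, symbol in enumerate(roman_symbols)' loop, carried state (successive_flag, symbol_index)
def successive_repeated_loop (xs : List String) : Nat → List String → (Bool × Int) → Bool × Int
  | _, [], st => st
  | index, symbol :: rest, st =>
    let st1 : Bool × Int :=
      if NO_REPEATED_SYMBOLS.contains symbol then
        let next_symbol := (PySem.List.pyGet? xs ((index : Int) + 1)).getD ""
        if symbol ≠ next_symbol then (false, st.2) else (true, (index : Int))
      else st
    let st2 : Bool × Int :=
      if REPEATED_SYMBOLS.contains symbol then
        let next_successive_symbols :=
          match PySem.List.pyGet? xs ((index : Int) + 3) with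
          | none => ([] : List String)
          | some _ => PySem.List.slice xs (some (index : Int)) (some ((index : Int) + 4))
        if (PySem.Set.ofList next_successive_symbols).length == 1 then (true, (index : Int))
        else (false, st1.2)
      else st1
    if st2.1 then st2 else successive_repeated_loop xs (index + 1) rest st2

def successive_repeated_py (roman_symbols : List String) : Bool × Int :=
  successive_repeated_loop roman_symbols 0 roman_symbols (false, -1)

-- ===== PORT B =====
-- inner while: length of the run of elements equal to s at the front of the list
def pvRunLen : List String → String → Nat
  | [], _ => 0
  | x :: rest, s => if x == s then pvRunLen rest s + 1 else 0

-- outer while: the run-length encoding, (symbol, start index, run length)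
def pvRleGroups : List String → Nat → List (String × Nat × Nat)
  | [], _ => []
  | s :: rest, i =>
    (s, i, pvRunLen rest s + 1) :: pvRleGroups (rest.drop (pvRunLen rest s)) (i + pvRunLen rest s + 1)
termination_by xs _ => xs.length
decreasing_by simp

-- the 'for symbol, start, length in groups' scan
def pvScanGroups : List (String × Nat × Nat) → Bool × Int
  | [] => (false, -1)
  | (symbol, start, length) :: rest =>
    if NO_REPEATED_SYMBOLS.contains symbol ∧ 2 ≤ length then (true, (start : Int))
    else if REPEATED_SYMBOLS.contains symbol ∧ 4 ≤ length then (true, (start : Int))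
    else pvScanGroups rest

def successive_repeated_py_alt (roman_symbols : List String) : Bool × Int :=
  pvScanGroups (pvRleGroups roman_symbols 0)

-- ===== PRECONDITION & SPEC =====
def Spec_successive_repeated_py (roman_symbols : List String) (out : Bool × Int) : Prop := out = successive_repeated_py_alt roman_symbols
instance (roman_symbols : List String) (out : Bool × Int) : Decidable (Spec_successive_repeated_py roman_symbols out) := by unfold Spec_successive_repeated_py; infer_instance

-- ===== CLAIM (what is proved, stated in full; the proofs are below) =====
def Claim_equal_successive_repeated_py : Prop := ∀ (roman_symbols : List String), Dom_successive_repeated_py roman_symbols → Spec_successive_repeated_py roman_symbols (successive_repeated_py roman_symbols)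

-- ===== LEMMAS AND PROOFS =====

-- the condition A's loop body computes for the suffix s :: rest (REPEATED branch overrides the NO_REPEATED one, as in A)
def pvQCond (s : String) (rest : List String) : Bool :=
  if REPEATED_SYMBOLS.contains s then
    (PySem.Set.ofList (match rest[2]? with
      | none => ([] : List String)
      | some _ => (s :: rest).take 4)).length == 1
  else if NO_REPEATED_SYMBOLS.contains s then s == rest.head?.getD ""
  else false

-- the same condition as a function of the run length k at the suffix
def pvQual (s : String) (k : Nat) : Bool :=
  if REPEATED_SYMBOLS.contains s then 4 ≤ k
  else if NO_REPEATED_SYMBOLS.contains s then 2 ≤ k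
  else false

-- index of the first qualifying suffix
def pvFirstQ : List String → Nat → Option Nat
  | [], _ => none
  | s :: rest, i => if pvQCond s rest then some i else pvFirstQ rest (i + 1)

theorem pv_disjoint (s : String) (h1 : REPEATED_SYMBOLS.contains s)
    (h2 : NO_REPEATED_SYMBOLS.contains s) : False := by
  simp [REPEATED_SYMBOLS, NO_REPEATED_SYMBOLS] at h1 h2
  rcases h1 with h | h | h | h <;> subst h <;> simp at h2

theorem pvRunLen_le_length (l : List String) (s : String) : pvRunLen l s <= l.length := by
  induction l with
  | nil => simp [pvRunLen]
  | cons x t ih => simp only [pvRunLen, List.length_cons]; split <;> omega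

theorem pv_setlen4 (a b c s : String) :
    ((PySem.Set.ofList [s, a, b, c]).length == 1) = (a == s && (b == s && c == s)) := by
  by_cases ha : a = s <;> by_cases hb : b = s <;> by_cases hc : c = s <;>
    simp [ha, hb, hc, PySem.Set.ofList, PySem.Set.add, PySem.Set.contains, PySem.Set.empty] <;>
    split_ifs <;> simp <;> tauto

theorem pv_qcond_qual (s : String) (rest : List String) :
    pvQCond s rest = pvQual s (pvRunLen rest s + 1) := by
  unfold pvQCond pvQual
  by_cases hR : REPEATED_SYMBOLS.contains s
  · rw [if_pos hR, if_pos hR]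
    rcases rest with _ | ⟨a, _ | ⟨b, _ | ⟨c, t⟩⟩⟩
    · simp [pvRunLen, PySem.Set.ofList, PySem.Set.empty]
    · have hle := pvRunLen_le_length [a] s
      simp only [List.length_cons, List.length_nil] at hle
      have h4 : ¬ (4 <= pvRunLen [a] s + 1) := by omega
      simp [h4, PySem.Set.ofList, PySem.Set.empty]
    · have hle := pvRunLen_le_length [a, b] s
      simp only [List.length_cons, List.length_nil] at hle
      have h4 : ¬ (4 <= pvRunLen [a, b] s + 1) := by omega
      simp [h4, PySem.Set.ofList, PySem.Set.empty]
    · have hm : (match (a :: b :: c :: t)[2]? with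
          | none => ([] : List String)
          | some _ => (s :: a :: b :: c :: t).take 4) = [s, a, b, c] := rfl
      rw [hm, pv_setlen4]
      by_cases ha : a = s <;> by_cases hb : b = s <;> by_cases hc : c = s <;>
        simp [pvRunLen, ha, hb, hc]
  · rw [if_neg hR, if_neg hR]
    by_cases hN : NO_REPEATED_SYMBOLS.contains s
    · rw [if_pos hN, if_pos hN]
      have hs : s ≠ "" := by
        simp [NO_REPEATED_SYMBOLS] at hN
        rcases hN with h | h | h <;> subst h <;> decide
      rcases rest with _ | ⟨a, t⟩
      · simp [pvRunLen, hs]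
      · by_cases ha : a = s
        · simp [pvRunLen, ha]
        · have ha' : ¬ s = a := fun h => ha h.symm
          simp [pvRunLen, ha, ha']
    · rw [if_neg hN, if_neg hN]

theorem pv_qual_mono (s : String) (k k' : Nat) (h : k' <= k) (hq : pvQual s k = false) :
    pvQual s k' = false := by
  unfold pvQual at hq ⊢
  split_ifs at hq ⊢
  · simp only [decide_eq_false_iff_not] at hq ⊢; omega
  · simp only [decide_eq_false_iff_not] at hq ⊢; omega
  · rfl

theorem pv_firstQ_skip (s : String) : ∀ (rest : List String) (i : Nat),
    pvQual s (pvRunLen rest s + 1) = false →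
    pvFirstQ (s :: rest) i = pvFirstQ (rest.drop (pvRunLen rest s)) (i + pvRunLen rest s + 1) := by
  intro rest
  induction rest with
  | nil =>
    intro i hq
    simp only [pvRunLen] at hq
    simp [pvFirstQ, pvRunLen, pv_qcond_qual, hq]
  | cons x t ih =>
    intro i hq
    by_cases hx : x = s
    · subst hx
      have hr : pvRunLen (x :: t) x = pvRunLen t x + 1 := by simp [pvRunLen]
      rw [hr] at hq
      have hq2 : pvQual x (pvRunLen t x + 1) = false := pv_qual_mono x _ _ (by omega) hq
      have step : pvFirstQ (x :: x :: t) i = pvFirstQ (x :: t) (i + 1) := by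
        have hc : pvQCond x (x :: t) = false := by rw [pv_qcond_qual, hr]; exact hq
        simp [pvFirstQ, hc]
      rw [step, ih (i + 1) hq2, hr, List.drop_succ_cons]
      congr 1
      omega
    · have hr : pvRunLen (x :: t) s = 0 := by simp [pvRunLen, hx]
      rw [hr] at hq
      have hc : pvQCond s (x :: t) = false := by rw [pv_qcond_qual, hr]; exact hq
      rw [hr, List.drop_zero]
      simp [pvFirstQ, hc]

theorem pv_loop_eq (xs : List String) : ∀ (suffix : List String) (i : Nat) (v : Int),
    xs.drop i = suffix →
    successive_repeated_loop xs i suffix (false, v) =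
      (match pvFirstQ suffix i with
        | some k => (true, (k : Int))
        | none => (false, v)) := by
  intro suffix
  induction suffix with
  | nil => intro i v _; simp [successive_repeated_loop, pvFirstQ]
  | cons s rest ih =>
    intro i v h
    have h1 : xs.drop (i + 1) = rest := by
      rw [← List.drop_drop] at *
      · rw [h]; rfl
    have hget1 : PySem.List.pyGet? xs ((i : Int) + 1) = rest.head? := by
      have e : ((i : Int) + 1) = ((i + 1 : Nat) : Int) := by push_cast; ring
      rw [e, PySem.List.pyGet?_natCast]
      have hd : (List.drop (i + 1) xs)[(0 : Nat)]? = xs[i + 1 + 0]? := List.getElem?_drop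
      rw [h1] at hd
      simpa [List.head?_eq_getElem?] using hd.symm
    have hget3 : PySem.List.pyGet? xs ((i : Int) + 3) = rest[2]? := by
      have e : ((i : Int) + 3) = ((i + 3 : Nat) : Int) := by push_cast; ring
      rw [e, PySem.List.pyGet?_natCast]
      have hd : (List.drop (i + 1) xs)[(2 : Nat)]? = xs[i + 1 + 2]? := List.getElem?_drop
      rw [h1] at hd
      simpa [show i + 1 + 2 = i + 3 by omega] using hd.symm
    have hslice : PySem.List.slice xs (some (i : Int)) (some ((i : Int) + 4)) =
        (s :: rest).take 4 := by
      have e : ((i : Int) + 4) = ((i + 4 : Nat) : Int) := by push_cast; ring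
      rw [e, PySem.List.slice_natCast, ← h]
      congr 1
      omega
    -- one iteration of A's loop
    show (let st1 : Bool × Int :=
      if NO_REPEATED_SYMBOLS.contains s then
        if s ≠ (PySem.List.pyGet? xs ((i : Int) + 1)).getD "" then (false, v) else (true, (i : Int))
      else (false, v)
      let st2 : Bool × Int :=
      if REPEATED_SYMBOLS.contains s then
        if (PySem.Set.ofList (match PySem.List.pyGet? xs ((i : Int) + 3) with
            | none => ([] : List String)
            | some _ => PySem.List.slice xs (some (i : Int)) (some ((i : Int) + 4)))).length == 1
        then (true, (i : Int))
        else (false, st1.2)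
      else st1
      if st2.1 then st2 else successive_repeated_loop xs (i + 1) rest st2) =
      (match pvFirstQ (s :: rest) i with
        | some k => (true, (k : Int))
        | none => (false, v))
    rw [hget1, hget3, hslice]
    have hstep : (let st1 : Bool × Int :=
      if NO_REPEATED_SYMBOLS.contains s then
        if s ≠ rest.head?.getD "" then (false, v) else (true, (i : Int))
      else (false, v)
      let st2 : Bool × Int :=
      if REPEATED_SYMBOLS.contains s then
        if (PySem.Set.ofList (match rest[2]? with
            | none => ([] : List String)
            | some _ => (s :: rest).take 4)).length == 1 then (true, (i : Int))
        else (false, st1.2)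
      else st1
      st2) = (if pvQCond s rest then (true, (i : Int)) else (false, v)) := by
      unfold pvQCond
      cases hRb : REPEATED_SYMBOLS.contains s <;> cases hNb : NO_REPEATED_SYMBOLS.contains s
      · simp
      · by_cases he : s = rest.head?.getD "" <;> simp [he]
      · simp
      · exact (pv_disjoint s hRb hNb).elim
    simp only [hstep]
    by_cases hq : pvQCond s rest
    · simp [pvFirstQ, hq]
    · have hfq : pvFirstQ (s :: rest) i = pvFirstQ rest (i + 1) := by simp [pvFirstQ, hq]
      simp only [hq, Bool.false_eq_true, if_neg, not_false_iff, hfq]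
      exact ih (i + 1) v h1

theorem pv_scan_eq : ∀ (n : Nat) (suffix : List String), suffix.length <= n → ∀ (i : Nat),
    pvScanGroups (pvRleGroups suffix i) =
      (match pvFirstQ suffix i with
        | some k => (true, (k : Int))
        | none => (false, -1)) := by
  intro n
  induction n with
  | zero =>
    intro suffix hlen i
    have hnil : suffix = [] := List.eq_nil_of_length_eq_zero (by omega)
    subst hnil
    simp [pvRleGroups, pvScanGroups, pvFirstQ]
  | succ n ih =>
    intro suffix hlen i
    rcases suffix with _ | ⟨s, rest⟩
    · simp [pvRleGroups, pvScanGroups, pvFirstQ]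
    · rw [pvRleGroups]
      by_cases hq : pvQual s (pvRunLen rest s + 1) = true
      · have hfq : pvFirstQ (s :: rest) i = some i := by
          simp [pvFirstQ, pv_qcond_qual, hq]
        rw [hfq]
        unfold pvQual at hq
        unfold pvScanGroups
        split_ifs with h1 h2
        · rfl
        · rfl
        · exfalso
          by_cases hRb : REPEATED_SYMBOLS.contains s
          · rw [if_pos hRb] at hq
            simp only [decide_eq_true_eq] at hq
            exact h2 ⟨hRb, by omega⟩
          · rw [if_neg hRb] at hq
            by_cases hNb : NO_REPEATED_SYMBOLS.contains s
            · rw [if_pos hNb] at hq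
              simp only [decide_eq_true_eq] at hq
              exact h1 ⟨hNb, by omega⟩
            · rw [if_neg hNb] at hq
              exact Bool.false_ne_true hq
      · have hq' : pvQual s (pvRunLen rest s + 1) = false := by
          cases hb : pvQual s (pvRunLen rest s + 1)
          · rfl
          · exact (hq hb).elim
        have hc1 : ¬ (NO_REPEATED_SYMBOLS.contains s ∧ 2 <= pvRunLen rest s + 1) := by
          rintro ⟨hN, hk⟩
          unfold pvQual at hq'
          have hRb : REPEATED_SYMBOLS.contains s = false := by
            cases hb : REPEATED_SYMBOLS.contains s
            · rfl
            · exact (pv_disjoint s hb hN).elim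
          rw [hRb] at hq'
          simp only [Bool.false_eq_true, if_false, if_pos hN, decide_eq_false_iff_not] at hq'
          omega
        have hc2 : ¬ (REPEATED_SYMBOLS.contains s ∧ 4 <= pvRunLen rest s + 1) := by
          rintro ⟨hR, hk⟩
          unfold pvQual at hq'
          rw [if_pos hR] at hq'
          simp only [decide_eq_false_iff_not] at hq'
          omega
        unfold pvScanGroups
        rw [if_neg hc1, if_neg hc2]
        have hlen' : (rest.drop (pvRunLen rest s)).length <= n := by
          simp only [List.length_cons] at hlen
          simp only [List.length_drop]
          omega
        rw [ih _ hlen' (i + pvRunLen rest s + 1), pv_firstQ_skip s rest i hq']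

-- ===== VERDICT (by name: the statement is the Claim_ definition above) =====
theorem successive_repeated_py_spec : Claim_equal_successive_repeated_py := by
  intro xs _
  unfold Spec_successive_repeated_py successive_repeated_py successive_repeated_py_alt
  rw [pv_loop_eq xs xs 0 (-1) (by simp), pv_scan_eq xs.length xs le_rfl 0]
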